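-- pv_equiv track=rewrite | github.com/PrincessSats/unistartup | backend/app/routes/education.py | _compute_passed_users_count
-- ===== SOURCE A (Python) =====
-- from typing import Dict, Iterable, List, Optional, Set
--
-- def _compute_passed_users_count(
--     required_flag_ids: set[str],
--     correct_flags_by_user: Dict[int, set[str]],
-- ) -> int:
--     if not correct_flags_by_user:
--         return 0
--     if not required_flag_ids:
--         return len(correct_flags_by_user)
--     return sum(1 for flags in correct_flags_by_user.values() if required_flag_ids.issubset(flags))
-- ===== SOURCE B (Python) =====
-- def _compute_passed_users_count(required_flag_ids, correct_flags_by_user):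
--     if not required_flag_ids:
--         return len(correct_flags_by_user)
--     # inverted index: flag id -> set of user ids having that flag
--     index = {}
--     for uid, flags in correct_flags_by_user.items():
--         for f in flags:
--             index.setdefault(f, set()).add(uid)
--     # intersect the posting lists of the required flags
--     survivors = None
--     for f in required_flag_ids:
--         posting = index.get(f)
--         if not posting:
--             return 0
--         survivors = posting if survivors is None else survivors & posting
--         if not survivors:
--             return 0
--     return len(survivors)
-- ===== Notes on version B (the rewrite author's own statement) =====
-- stated objective: alternative
-- what changed: Replaces the per-user subset-check scan with an inverted index (flag id -> set of user ids) whose required posting lists are intersected with early exit on an empty intersection.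
import Mathlib
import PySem

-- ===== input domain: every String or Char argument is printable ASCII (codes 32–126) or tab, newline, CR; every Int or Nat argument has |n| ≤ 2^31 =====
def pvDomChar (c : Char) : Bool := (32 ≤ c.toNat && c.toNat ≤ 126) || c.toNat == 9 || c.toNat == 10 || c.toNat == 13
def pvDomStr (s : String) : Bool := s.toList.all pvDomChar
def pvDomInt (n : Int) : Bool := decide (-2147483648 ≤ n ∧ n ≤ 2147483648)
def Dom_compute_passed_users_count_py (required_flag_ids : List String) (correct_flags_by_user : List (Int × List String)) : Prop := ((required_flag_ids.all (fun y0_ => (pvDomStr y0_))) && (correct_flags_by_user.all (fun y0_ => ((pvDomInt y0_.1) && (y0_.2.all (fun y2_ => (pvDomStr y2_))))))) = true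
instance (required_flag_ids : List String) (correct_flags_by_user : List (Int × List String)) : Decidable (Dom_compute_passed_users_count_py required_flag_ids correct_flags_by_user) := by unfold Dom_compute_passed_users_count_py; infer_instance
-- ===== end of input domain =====

-- B replaces A's per-user subset scan by an inverted index (flag -> set of user ids) whose
-- required posting lists are intersected (objective: alternative algorithm, same results).


-- ===== PORT A =====
def compute_passed_users_count_py (required_flag_ids : List String) (correct_flags_by_user : List (Int × List String)) : Int :=
  if correct_flags_by_user.isEmpty then 0
  else if required_flag_ids.isEmpty then (correct_flags_by_user.length : Int)
  else correct_flags_by_user.foldl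
    (fun acc p => if PySem.Set.issubset required_flag_ids p.2 then acc + 1 else acc) 0

-- ===== PORT B =====
-- index.setdefault(f, set()).add(uid) for every flag of every user
def pvIndex (correct_flags_by_user : List (Int × List String)) : PySem.Dict String (PySem.Set Int) :=
  correct_flags_by_user.foldl
    (fun d p => p.2.foldl (fun d f => d.modify f PySem.Set.empty (fun s => PySem.Set.add s p.1)) d)
    PySem.Dict.empty

-- the 'for f in required_flag_ids' intersection loop; acc = survivors (None before the first flag)
def pvInterLoop (idx : PySem.Dict String (PySem.Set Int)) (req : List String)
    (acc : Option (PySem.Set Int)) : Int :=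
  match req with
  | [] =>
    match acc with
    | some s => PySem.Set.len s
    | none => 0       -- unreachable: the loop is entered only with a nonempty req
  | f :: rest =>
    let posting := idx.getD f PySem.Set.empty
    if posting.isEmpty then 0
    else
      let s := match acc with | none => posting | some s => PySem.Set.inter s posting
      if s.isEmpty then 0 else pvInterLoop idx rest (some s)

def compute_passed_users_count_py_alt (required_flag_ids : List String) (correct_flags_by_user : List (Int × List String)) : Int :=
  if required_flag_ids.isEmpty then (correct_flags_by_user.length : Int)
  else pvInterLoop (pvIndex correct_flags_by_user) required_flag_ids none

-- ===== PRECONDITION & SPEC =====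
-- Pre_ excludes association lists with duplicate user ids: they cannot arise from A's
-- Python dict argument, and on them the dict reading (last value wins) is a corner with
-- no canonical meaning for A's per-entry count.
def Pre_compute_passed_users_count_py (required_flag_ids : List String) (correct_flags_by_user : List (Int × List String)) : Prop :=
  (correct_flags_by_user.map Prod.fst).Nodup
instance (required_flag_ids : List String) (correct_flags_by_user : List (Int × List String)) : Decidable (Pre_compute_passed_users_count_py required_flag_ids correct_flags_by_user) := by unfold Pre_compute_passed_users_count_py; infer_instance

def pvWitness_compute_passed_users_count_py : List String × (List (Int × List String)) :=
  (["a"], [(1, ["a", "b"]), (2, ["b"])])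

def Spec_compute_passed_users_count_py (required_flag_ids : List String) (correct_flags_by_user : List (Int × List String)) (out : Int) : Prop := out = compute_passed_users_count_py_alt required_flag_ids correct_flags_by_user
instance (required_flag_ids : List String) (correct_flags_by_user : List (Int × List String)) (out : Int) : Decidable (Spec_compute_passed_users_count_py required_flag_ids correct_flags_by_user out) := by unfold Spec_compute_passed_users_count_py; infer_instance

-- ===== CLAIM (what is proved, stated in full; the proofs are below) =====
def Claim_equal_compute_passed_users_count_py : Prop := ∀ (required_flag_ids : List String) (correct_flags_by_user : List (Int × List String)), Dom_compute_passed_users_count_py required_flag_ids correct_flags_by_user → Pre_compute_passed_users_count_py required_flag_ids correct_flags_by_user → Spec_compute_passed_users_count_py required_flag_ids correct_flags_by_user (compute_passed_users_count_py required_flag_ids correct_flags_by_user)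

-- ===== LEMMAS AND PROOFS =====

-- one user's inner loop: the posting of f gains p.1 exactly when f is among the user's flags
lemma pvIndex_inner (flags : List String) (d : PySem.Dict String (PySem.Set Int)) (u : Int) (f : String) :
    (flags.foldl (fun d g => d.modify g PySem.Set.empty (fun s => PySem.Set.add s u)) d).getD f PySem.Set.empty
      = if f ∈ flags then PySem.Set.add (d.getD f PySem.Set.empty) u else d.getD f PySem.Set.empty := by
  induction flags generalizing d with
  | nil => simp
  | cons g rest ih =>
    simp only [List.foldl_cons, ih, PySem.Dict.getD_modify, List.mem_cons]
    by_cases hf : f = g <;> by_cases hr : f ∈ rest <;>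
      simp [hf, hr, PySem.Set.add_of_mem, PySem.Set.mem_add]

lemma pvIndex_getD (users : List (Int × List String)) (f : String) :
    ∀ d : PySem.Dict String (PySem.Set Int),
    (users.map Prod.fst).Nodup → (∀ p ∈ users, p.1 ∉ d.getD f PySem.Set.empty) →
    (users.foldl (fun d p => p.2.foldl (fun d g => d.modify g PySem.Set.empty (fun s => PySem.Set.add s p.1)) d) d).getD f PySem.Set.empty
      = d.getD f PySem.Set.empty ++ (users.filter (fun p => p.2.contains f)).map Prod.fst := by
  induction users with
  | nil => intro d _ _; simp
  | cons p rest ih =>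
    intro d hnd hnew
    simp only [List.map_cons, List.nodup_cons] at hnd
    have hd' : (p.2.foldl (fun d g => d.modify g PySem.Set.empty (fun s => PySem.Set.add s p.1)) d).getD f PySem.Set.empty
        = d.getD f PySem.Set.empty ++ (if p.2.contains f then [p.1] else []) := by
      rw [pvIndex_inner]
      by_cases hg : f ∈ p.2
      · have hnm : p.1 ∉ d.getD f PySem.Set.empty := hnew p (by simp)
        simp [hg, List.contains_iff_mem, PySem.Set.add_eq_ite,
          show p.1 ∉ d.getD f [] from hnm]
      · simp [hg, List.contains_iff_mem]
    rw [List.foldl_cons, ih _ hnd.2 ?_, hd']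
    · by_cases hg : f ∈ p.2 <;> simp [List.filter_cons, hg, List.contains_iff_mem]
    · intro q hq
      rw [hd']
      simp only [List.mem_append, not_or]
      refine ⟨hnew q (by simp [hq]), ?_⟩
      have hne : q.1 ≠ p.1 := by
        intro h
        exact hnd.1 (h ▸ List.mem_map_of_mem hq)
      by_cases hp : p.2.contains f <;> simp [hp, hne]

lemma pvIndex_posting (users : List (Int × List String)) (f : String)
    (hnd : (users.map Prod.fst).Nodup) :
    (pvIndex users).getD f PySem.Set.empty
      = (users.filter (fun p => p.2.contains f)).map Prod.fst := by
  have := pvIndex_getD users f PySem.Dict.empty hnd (by simp [PySem.Dict.getD_empty, PySem.Set.empty])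
  simpa [pvIndex, PySem.Dict.getD_empty, PySem.Set.empty] using this

lemma pvInterLoop_some (idx : PySem.Dict String (PySem.Set Int)) (req : List String) :
    ∀ s : PySem.Set Int,
    pvInterLoop idx req (some s)
      = ((s.filter (fun u => req.all (fun g => (idx.getD g PySem.Set.empty).contains u))).length : Int) := by
  induction req with
  | nil => intro s; simp [pvInterLoop, PySem.Set.len]
  | cons f rest ih =>
    intro s
    have hsplit : (s.filter (fun u => (f :: rest).all (fun g => (idx.getD g PySem.Set.empty).contains u)))
        = (PySem.Set.inter s (idx.getD f PySem.Set.empty)).filter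
            (fun u => rest.all (fun g => (idx.getD g PySem.Set.empty).contains u)) := by
      rw [PySem.Set.inter, List.filter_filter]
      apply List.filter_congr
      intro u hu
      simp [List.all_cons, Bool.and_comm]
    rw [hsplit]
    by_cases hp : idx.getD f ([] : PySem.Set Int) = []
    · simp [pvInterLoop, PySem.Set.empty, PySem.Set.inter, hp]
    · by_cases hs : PySem.Set.inter s (idx.getD f ([] : PySem.Set Int)) = []
      · simp [pvInterLoop, PySem.Set.empty, List.isEmpty_iff, hp, hs]
      · simp [pvInterLoop, PySem.Set.empty, List.isEmpty_iff, hp, hs, ih]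

-- head case of the loop: starting from None, a nonempty required list counts the members of
-- the first posting that lie in every required posting
lemma pvInterLoop_none (idx : PySem.Dict String (PySem.Set Int)) (f : String) (rest : List String) :
    pvInterLoop idx (f :: rest) none
      = (((idx.getD f PySem.Set.empty).filter
          (fun u => (f :: rest).all (fun g => (idx.getD g PySem.Set.empty).contains u))).length : Int) := by
  have habs : ((idx.getD f PySem.Set.empty).filter
          (fun u => (f :: rest).all (fun g => (idx.getD g PySem.Set.empty).contains u)))
      = ((idx.getD f PySem.Set.empty).filter
          (fun u => rest.all (fun g => (idx.getD g PySem.Set.empty).contains u))) := by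
    apply List.filter_congr
    intro u hu
    simp only [PySem.Set.empty] at hu
    simp [List.all_cons]
    exact fun _ => hu
  rw [habs]
  by_cases hp : idx.getD f ([] : PySem.Set Int) = []
  · simp [pvInterLoop, PySem.Set.empty, hp]
  · simp [pvInterLoop, PySem.Set.empty, List.isEmpty_iff, hp, pvInterLoop_some]

lemma pv_uniq (users : List (Int × List String)) (hnd : (users.map Prod.fst).Nodup)
    (p : Int × List String) (hp : p ∈ users) (C : Int × List String → Bool) :
    (((users.filter C).map Prod.fst).contains p.1) = C p := by
  by_cases hC : C p
  · simp only [hC]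
    rw [List.contains_iff_mem]
    exact List.mem_map_of_mem (List.mem_filter.2 ⟨hp, hC⟩)
  · simp only [hC]
    rw [Bool.eq_false_iff, Ne, List.contains_iff_mem]
    intro hmem
    obtain ⟨q, hq, hq1⟩ := List.mem_map.1 hmem
    obtain ⟨hqu, hqC⟩ := List.mem_filter.1 hq
    have : q = p := List.inj_on_of_nodup_map hnd hqu hp hq1
    rw [this] at hqC
    simp [hC] at hqC

-- ===== VERDICT (by name: the statement is the Claim_ definition above) =====
theorem compute_passed_users_count_py_spec : Claim_equal_compute_passed_users_count_py := by
  intro req users _ hpre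
  unfold Pre_compute_passed_users_count_py at hpre
  unfold Spec_compute_passed_users_count_py compute_passed_users_count_py compute_passed_users_count_py_alt
  cases req with
  | nil => cases users <;> simp
  | cons f rest =>
    have hpost : ∀ g, (pvIndex users).getD g PySem.Set.empty
        = (users.filter (fun p => p.2.contains g)).map Prod.fst :=
      fun g => pvIndex_posting users g hpre
    have hA : (if users.isEmpty = true then (0 : Int)
        else if (f :: rest).isEmpty = true then (users.length : Int)
        else users.foldl (fun acc p => if PySem.Set.issubset (f :: rest) p.2 then acc + 1 else acc) 0)
        = (users.countP (fun p => PySem.Set.issubset (f :: rest) p.2) : Int) := by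
      cases users with
      | nil => simp
      | cons u us =>
        simp only [List.isEmpty_cons, Bool.false_eq_true, if_false]
        rw [PySem.List.foldl_count_if]
        simp
    have hB : (if (f :: rest).isEmpty = true then (users.length : Int)
        else pvInterLoop (pvIndex users) (f :: rest) none)
        = pvInterLoop (pvIndex users) (f :: rest) none := by simp
    rw [hA, hB, pvInterLoop_none]
    simp only [hpost]
    rw [List.filter_map, List.length_map, List.filter_filter, List.countP_eq_length_filter]
    refine congrArg _ (congrArg _ (List.filter_congr ?_))
    intro p hp
    have hu : ∀ C : Int × List String → Bool,
        (decide (p.1 ∈ (users.filter C).map Prod.fst)) = C p := by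
      intro C
      rw [← pv_uniq users hpre p hp C]
      simp
    rw [PySem.Set.issubset]
    by_cases hf : f ∈ p.2 <;>
      simp [List.all_cons, hf, hu]
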